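-- pv_equiv track=rewrite | github.com/KRLGroup/kernel-representations-transfer | src/characteristic_set.py | characteristic_set
-- ===== SOURCE A (Python) =====
-- def characteristic_set(tran_func):
--     # Initialize the characteristic set with an empty set
--     char_set = set()
--
--     # Define a recursive function to explore all possible traces
--     def explore_trace(state, trace, trace_sym):
--         # Add the current trace to the characteristic set
--         char_set.add(tuple(trace_sym))
--
--         # Explore all possible transitions from the current state
--         for symbol, next_state in tran_func[state].items():
--             # If the next state is not in the trace, explore it
--             if next_state not in trace:
--                 explore_trace(next_state, trace + [next_state], trace_sym + [symbol])
--
--     # Start exploring traces from the initial state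
--     explore_trace(0, [0], [])
--
--     # Return the characteristic set of traces
--     return char_set
-- ===== SOURCE B (Python) =====
-- def characteristic_set(tran_func):
--     # Iterative DFS with an explicit stack of (state, path, symbols) frames
--     # instead of A's recursive closure; children are pushed in reversed order
--     # so frames are expanded in A's original transition order.
--     char_set = set()
--     stack = [(0, [0], [])]
--     while stack:
--         state, path, syms = stack.pop()
--         char_set.add(tuple(syms))
--         for symbol, next_state in reversed(list(tran_func[state].items())):
--             if next_state not in path:
--                 stack.append((next_state, path + [next_state], syms + [symbol]))
--     return char_set
-- ===== Notes on version B (the rewrite author's own statement) =====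
-- stated objective: alternative
-- what changed: Replaces A's recursive closure-based DFS with an iterative DFS over an explicit stack of (state, path, symbols) frames.
import Mathlib
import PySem

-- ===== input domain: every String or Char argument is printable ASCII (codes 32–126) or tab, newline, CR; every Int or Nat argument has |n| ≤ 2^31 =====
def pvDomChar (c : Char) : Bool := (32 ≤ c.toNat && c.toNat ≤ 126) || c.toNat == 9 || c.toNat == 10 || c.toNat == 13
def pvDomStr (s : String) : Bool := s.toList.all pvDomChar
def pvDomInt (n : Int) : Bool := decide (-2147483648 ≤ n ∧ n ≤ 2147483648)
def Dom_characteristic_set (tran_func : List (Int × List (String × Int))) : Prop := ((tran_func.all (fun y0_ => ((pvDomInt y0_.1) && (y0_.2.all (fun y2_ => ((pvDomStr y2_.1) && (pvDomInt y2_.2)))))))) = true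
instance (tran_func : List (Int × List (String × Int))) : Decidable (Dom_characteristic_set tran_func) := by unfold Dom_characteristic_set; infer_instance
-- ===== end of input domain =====

-- B changes the decomposition only: an explicit-stack iterative DFS loop instead of A's
-- recursive closure; same cost, same returned set (the ports are proved equal as lists).

-- ===== PORT A =====
-- helpers for A: tran_func[state].items() (total via getD; inputs where Python raises
-- KeyError are excluded by Pre_), the finite universe of states that can ever be
-- appended to a trace, and the termination measure counting states not yet visited
def pvItems (tf : List (Int × List (String × Int))) (s : Int) : List (String × Int) :=
  ((PySem.Dict.mk tf).get? s).getD []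

def pvStates (tf : List (Int × List (String × Int))) : List Int :=
  0 :: tf.flatMap (fun kv => kv.2.map Prod.snd)

def pvMu (tf : List (Int × List (String × Int))) (trace : List Int) : Nat :=
  ((pvStates tf).filter (fun x => decide (x ∉ trace))).length

-- termination lemmas cited by port A's decreasing_by (proofs about the measure only)
theorem pvFilter_le {S : List Int} (p q : Int → Prop) [DecidablePred p] [DecidablePred q]
    (h : ∀ x, p x → q x) :
    (S.filter (fun x => decide (p x))).length ≤ (S.filter (fun x => decide (q x))).length := by
  induction S with
  | nil => simp
  | cons a S ih =>
    simp only [List.filter_cons]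
    by_cases hp : p a
    · simp [hp, h a hp]; omega
    · by_cases hq : q a <;> simp [hp, hq] <;> omega

theorem pvFilter_lt {t : Int} {trace : List Int} : ∀ {S : List Int}, t ∈ S → t ∉ trace →
    (S.filter (fun x => decide (x ∉ trace ++ [t]))).length <
      (S.filter (fun x => decide (x ∉ trace))).length := by
  intro S
  induction S with
  | nil => intro h; cases h
  | cons a S ih =>
    intro hmem hnt
    simp only [List.filter_cons]
    by_cases hat : a = t
    · subst hat
      have h1 : decide (a ∉ trace ++ [a]) = false := by simp
      have h2 : decide (a ∉ trace) = true := by simp [hnt]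
      rw [h1, h2]
      have hle : (S.filter (fun x => decide (x ∉ trace ++ [a]))).length ≤
          (S.filter (fun x => decide (x ∉ trace))).length :=
        pvFilter_le _ _ (fun x hx => by simp at hx; exact hx.1)
      rw [if_neg Bool.false_ne_true, if_pos rfl]
      simp only [List.length_cons]
      omega
    · have hmem' : t ∈ S := by
        cases hmem with
        | head => exact absurd rfl hat
        | tail _ h => exact h
      have hpq : decide (a ∉ trace ++ [t]) = decide (a ∉ trace) := by
        by_cases ha : a ∈ trace <;> simp [ha, hat]
      rw [hpq]
      have hIH := ih hmem' hnt
      cases hq : decide (a ∉ trace) with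
      | false =>
        rw [if_neg Bool.false_ne_true, if_neg Bool.false_ne_true]
        exact hIH
      | true =>
        rw [if_pos rfl, if_pos rfl]
        simp only [List.length_cons]
        omega

theorem pvMu_lt {tf : List (Int × List (String × Int))} {t : Int} {trace : List Int}
    (hmem : t ∈ pvStates tf) (hnt : t ∉ trace) :
    pvMu tf (trace ++ [t]) < pvMu tf trace := pvFilter_lt hmem hnt

-- literal port of A's explore_trace: the entry-point add is inlined at each call site,
-- the for-loop over tran_func[state].items() is recursion over 'items'.
-- 't ∈ pvStates tf' in the guard is a termination guard only: it always holds where the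
-- Python recurses, since every next_state comes from a transition list of tran_func.
def pvGoA (tf : List (Int × List (String × Int))) (items : List (String × Int))
    (trace : List Int) (sym : List String) (acc : List (List String)) : List (List String) :=
  match items with
  | [] => acc
  | (a, t) :: rest =>
    let acc' := if h : t ∉ trace ∧ t ∈ pvStates tf then
        pvGoA tf (pvItems tf t) (trace ++ [t]) (sym ++ [a]) (PySem.Set.add acc (sym ++ [a]))
      else acc
    pvGoA tf rest trace sym acc'
termination_by (pvMu tf trace, items.length)
decreasing_by
  · exact Prod.Lex.left _ _ (pvMu_lt h.2 h.1)
  · exact Prod.Lex.right _ (by simp)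

def characteristic_set (tran_func : List (Int × List (String × Int))) : List (List String) :=
  pvGoA tran_func (pvItems tran_func 0) [0] [] (PySem.Set.add PySem.Set.empty [])

-- ===== PORT B =====
-- Source B's while-loop over the explicit stack, ported with the stack's top at the list
-- head (Source B pushes the children reversed onto a list-end stack, so prepending them in
-- original order is the same traversal). The fuel argument is a totality guard only:
-- pvFuelB strictly bounds the number of loop iterations (proved below), so the 0 branch
-- is never taken on any input.
def pvFuelB (tf : List (Int × List (String × Int))) : Nat :=
  ((tf.flatMap (fun kv => kv.2)).length + 1) ^ ((tf.flatMap (fun kv => kv.2)).length + 1) + 1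

def pvLoopB (tf : List (Int × List (String × Int))) :
    Nat → List (Int × List Int × List String) → List (List String) → List (List String)
  | 0, _, acc => acc
  | _ + 1, [], acc => acc
  | fuel + 1, (s, path, syms) :: rest, acc =>
    pvLoopB tf fuel
      (((((PySem.Dict.mk tf).get? s).getD []).filter (fun p => decide (p.2 ∉ path))).map
          (fun p => (p.2, path ++ [p.2], syms ++ [p.1])) ++ rest)
      (PySem.Set.add acc syms)

def characteristic_set_alt (tran_func : List (Int × List (String × Int))) : List (List String) :=
  pvLoopB tran_func (pvFuelB tran_func) [(0, [0], [])] PySem.Set.empty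

-- ===== PRECONDITION & SPEC =====
-- Pre_ holds exactly when every state reachable from state 0 is a key of tran_func —
-- precisely the inputs on which Python A's 'tran_func[state]' never raises KeyError.
-- Reachability is a bounded transitive-closure iteration (pvL tf + 1 rounds bound the
-- longest shortest path), not A's simple-path enumeration.
def pvL (tf : List (Int × List (String × Int))) : Nat :=
  (tf.flatMap (fun kv => kv.2)).length

def pvReach (tf : List (Int × List (String × Int))) : List Int :=
  (fun R => R.foldl (fun acc s => PySem.Set.update acc ((pvItems tf s).map Prod.snd)) R)^[pvL tf + 1]
    (PySem.Set.ofList [0])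

def Pre_characteristic_set (tran_func : List (Int × List (String × Int))) : Prop :=
  ∀ s ∈ pvReach tran_func, s ∈ tran_func.map Prod.fst
instance (tran_func : List (Int × List (String × Int))) : Decidable (Pre_characteristic_set tran_func) := by
  unfold Pre_characteristic_set; infer_instance

def pvWitness_characteristic_set : (List (Int × List (String × Int))) :=
  [(0, [("a", 1)]), (1, [("b", 0)])]

def Spec_characteristic_set (tran_func : List (Int × List (String × Int))) (out : List (List String)) : Prop := out = characteristic_set_alt tran_func
instance (tran_func : List (Int × List (String × Int))) (out : List (List String)) : Decidable (Spec_characteristic_set tran_func out) := by unfold Spec_characteristic_set; infer_instance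

-- ===== CLAIM (what is proved, stated in full; the proofs are below) =====
def Claim_equal_characteristic_set : Prop := ∀ (tran_func : List (Int × List (String × Int))), Dom_characteristic_set tran_func → Pre_characteristic_set tran_func → Spec_characteristic_set tran_func (characteristic_set tran_func)

-- ===== LEMMAS AND PROOFS =====

-- the frames pushed for one expanded node, and the multiset weight of a stack
def pvFrames (tf : List (Int × List (String × Int))) (trace : List Int) (sym : List String)
    (items : List (String × Int)) : List (Int × List Int × List String) :=
  (items.filter (fun p => decide (p.2 ∉ trace))).map (fun p => (p.2, trace ++ [p.2], sym ++ [p.1]))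

def pvW (tf : List (Int × List (String × Int))) (st : List (Int × List Int × List String)) : Nat :=
  (st.map (fun f => (pvL tf + 1) ^ (pvMu tf f.2.1))).sum

theorem pvGet_mem {tf : List (Int × List (String × Int))} {s : Int} {v : List (String × Int)}
    (h : (PySem.Dict.mk tf).get? s = some v) : v ∈ tf.map Prod.snd := by
  induction tf with
  | nil =>
    rw [show PySem.Dict.mk ([] : List (Int × List (String × Int))) = PySem.Dict.empty from rfl,
      PySem.Dict.get?_empty] at h
    cases h
  | cons kv rest ih =>
    rw [show kv = (kv.1, kv.2) from rfl] at h
    rw [PySem.Dict.get?_mk_cons] at h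
    by_cases hk : (kv.1 == s) = true
    · rw [if_pos hk] at h
      injection h with h
      subst h
      exact List.mem_cons_self ..
    · rw [if_neg hk] at h
      exact List.mem_cons_of_mem _ (ih h)

theorem pvItems_targets (tf : List (Int × List (String × Int))) (s : Int) :
    ∀ p ∈ pvItems tf s, p.2 ∈ pvStates tf := by
  intro p hp
  unfold pvItems at hp
  cases hg : (PySem.Dict.mk tf).get? s with
  | none => simp [hg] at hp
  | some v =>
    simp [hg] at hp
    have hv := pvGet_mem hg
    simp only [List.mem_map] at hv
    obtain ⟨kv, hkv, hveq⟩ := hv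
    unfold pvStates
    exact List.mem_cons_of_mem _
      (List.mem_flatMap.mpr ⟨kv, hkv, by rw [hveq]; exact List.mem_map_of_mem hp⟩)

theorem pvGet_len {tf : List (Int × List (String × Int))} {s : Int} {v : List (String × Int)}
    (h : (PySem.Dict.mk tf).get? s = some v) : v.length ≤ pvL tf := by
  unfold pvL
  induction tf with
  | nil =>
    rw [show PySem.Dict.mk ([] : List (Int × List (String × Int))) = PySem.Dict.empty from rfl,
      PySem.Dict.get?_empty] at h
    cases h
  | cons kv rest ih =>
    rw [show kv = (kv.1, kv.2) from rfl, PySem.Dict.get?_mk_cons] at h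
    simp only [List.flatMap_cons, List.length_append]
    by_cases hk : (kv.1 == s) = true
    · rw [if_pos hk] at h
      injection h with h
      subst h
      exact Nat.le_add_right _ _
    · rw [if_neg hk] at h
      have := ih h
      omega

theorem pvItems_len (tf : List (Int × List (String × Int))) (s : Int) :
    (pvItems tf s).length ≤ pvL tf := by
  unfold pvItems
  cases hg : (PySem.Dict.mk tf).get? s with
  | none => simp [pvL]
  | some v => simpa using pvGet_len hg

theorem pvW_step (tf : List (Int × List (String × Int))) (s : Int) (trace : List Int)
    (sym : List String) (rest : List (Int × List Int × List String)) :
    pvW tf (pvFrames tf trace sym (pvItems tf s) ++ rest) < pvW tf ((s, trace, sym) :: rest) := by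
  unfold pvW
  simp only [List.map_append, List.sum_append, List.map_cons, List.sum_cons]
  have hsuff : ((pvFrames tf trace sym (pvItems tf s)).map
      (fun f => (pvL tf + 1) ^ (pvMu tf f.2.1))).sum < (pvL tf + 1) ^ (pvMu tf trace) := by
    set C := pvFrames tf trace sym (pvItems tf s) with hC
    by_cases hne : C = []
    · rw [hne]
      simp only [List.map_nil, List.sum_nil]
      positivity
    · have hchild : ∀ f ∈ C, pvMu tf f.2.1 < pvMu tf trace := by
        intro f hf
        rw [hC] at hf
        unfold pvFrames at hf
        simp only [List.mem_map, List.mem_filter] at hf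
        obtain ⟨p, ⟨hpmem, hpnt⟩, hfeq⟩ := hf
        have ht : p.2 ∉ trace := by simpa using hpnt
        have hs : p.2 ∈ pvStates tf := pvItems_targets tf s p hpmem
        rw [← hfeq]
        exact pvMu_lt hs ht
      obtain ⟨f0, hf0⟩ := List.exists_mem_of_ne_nil C hne
      have hμpos : 1 ≤ pvMu tf trace := Nat.one_le_iff_ne_zero.mpr (by
        have := hchild f0 hf0; omega)
      have hbound : ∀ x ∈ C.map (fun f => (pvL tf + 1) ^ (pvMu tf f.2.1)),
          x ≤ (pvL tf + 1) ^ (pvMu tf trace - 1) := by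
        intro x hx
        simp only [List.mem_map] at hx
        obtain ⟨f, hf, hxeq⟩ := hx
        rw [← hxeq]
        exact Nat.pow_le_pow_right (by omega) (by have := hchild f hf; omega)
      have hlen : C.length ≤ pvL tf := by
        rw [hC]
        unfold pvFrames
        rw [List.length_map]
        exact le_trans (List.length_filter_le _ _) (pvItems_len tf s)
      calc (C.map (fun f => (pvL tf + 1) ^ (pvMu tf f.2.1))).sum
          ≤ (C.map (fun f => (pvL tf + 1) ^ (pvMu tf f.2.1))).length • (pvL tf + 1) ^ (pvMu tf trace - 1) :=
            List.sum_le_card_nsmul _ _ hbound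
        _ = C.length * (pvL tf + 1) ^ (pvMu tf trace - 1) := by rw [List.length_map, smul_eq_mul]
        _ ≤ pvL tf * (pvL tf + 1) ^ (pvMu tf trace - 1) := Nat.mul_le_mul_right _ hlen
        _ < (pvL tf + 1) * (pvL tf + 1) ^ (pvMu tf trace - 1) := by
            have hp : 0 < (pvL tf + 1) ^ (pvMu tf trace - 1) := by positivity
            exact (Nat.mul_lt_mul_right hp).mpr (by omega)
        _ = (pvL tf + 1) ^ (pvMu tf trace) := by
            rw [← pow_succ']
            congr 1
            omega
  omega

-- an ideal (fuel-free) form of B's loop, used only in the proofs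
def pvGoB (tf : List (Int × List (String × Int))) (st : List (Int × List Int × List String))
    (acc : List (List String)) : List (List String) :=
  match st with
  | [] => acc
  | (s, trace, sym) :: rest =>
    pvGoB tf (pvFrames tf trace sym (pvItems tf s) ++ rest) (PySem.Set.add acc sym)
termination_by pvW tf st
decreasing_by
  exact pvW_step tf s trace sym rest

theorem pvGoB_nil (tf : List (Int × List (String × Int))) (acc : List (List String)) :
    pvGoB tf [] acc = acc := by rw [pvGoB]

theorem pvGoB_cons (tf : List (Int × List (String × Int))) (s : Int) (trace : List Int)
    (sym : List String) (rest : List (Int × List Int × List String)) (acc : List (List String)) :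
    pvGoB tf ((s, trace, sym) :: rest) acc =
      pvGoB tf (pvFrames tf trace sym (pvItems tf s) ++ rest) (PySem.Set.add acc sym) := by
  rw [pvGoB]

-- with enough fuel, pvLoopB computes pvGoB
theorem pvLoopB_eq_pvGoB (tf : List (Int × List (String × Int))) :
    ∀ (fuel : Nat) (st : List (Int × List Int × List String)) (acc : List (List String)),
    pvW tf st < fuel → pvLoopB tf fuel st acc = pvGoB tf st acc := by
  intro fuel
  induction fuel with
  | zero => intro st acc h; omega
  | succ g ih =>
    intro st acc h
    match st with
    | [] => rw [pvLoopB, pvGoB_nil]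
    | (s, trace, sym) :: rest =>
      rw [pvLoopB, pvGoB_cons]
      have hfr : ((((PySem.Dict.mk tf).get? s).getD []).filter (fun p => decide (p.2 ∉ trace))).map
          (fun p => (p.2, trace ++ [p.2], sym ++ [p.1])) =
          pvFrames tf trace sym (pvItems tf s) := by
        unfold pvFrames pvItems
        rfl
      rw [hfr]
      exact ih _ _ (by have := pvW_step tf s trace sym rest; omega)

theorem pvFuelB_big (tf : List (Int × List (String × Int))) :
    pvW tf [(0, [0], [])] < pvFuelB tf := by
  unfold pvW
  rw [show pvFuelB tf = (pvL tf + 1) ^ (pvL tf + 1) + 1 from rfl]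
  simp only [List.map_cons, List.map_nil, List.sum_cons, List.sum_nil, Nat.add_zero]
  have hμ : pvMu tf [0] ≤ pvL tf + 1 := by
    unfold pvMu
    calc ((pvStates tf).filter (fun x => decide (x ∉ [0]))).length
        ≤ (pvStates tf).length := List.length_filter_le _ _
      _ = pvL tf + 1 := by
          unfold pvStates pvL
          simp [List.length_flatMap]
  have h1 : (pvL tf + 1) ^ pvMu tf [0] ≤ (pvL tf + 1) ^ (pvL tf + 1) :=
    Nat.pow_le_pow_right (by omega) hμ
  omega

-- the key bridge: expanding all frames of one node on pvGoB's stack is pvGoA on its items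
theorem pvKey (n : Nat) : ∀ (tf : List (Int × List (String × Int))) (items : List (String × Int))
    (trace : List Int) (sym : List String) (st : List (Int × List Int × List String))
    (acc : List (List String)),
    pvMu tf trace ≤ n → (∀ p ∈ items, p.2 ∈ pvStates tf) →
    pvGoB tf (pvFrames tf trace sym items ++ st) acc = pvGoB tf st (pvGoA tf items trace sym acc) := by
  induction n using Nat.strong_induction_on with
  | _ n IH =>
    intro tf items
    induction items with
    | nil =>
      intro trace sym st acc _ _
      simp [pvFrames, pvGoA]
    | cons p rest ihr =>
      obtain ⟨a, t⟩ := p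
      intro trace sym st acc hμ hmem
      have hmemr : ∀ q ∈ rest, q.2 ∈ pvStates tf := fun q hq => hmem q (by simp [hq])
      by_cases ht : t ∉ trace
      · have htS : t ∈ pvStates tf := hmem (a, t) (by simp)
        have hfr : pvFrames tf trace sym ((a, t) :: rest) =
            (t, trace ++ [t], sym ++ [a]) :: pvFrames tf trace sym rest := by
          simp [pvFrames, ht]
        rw [hfr, List.cons_append, pvGoB_cons]
        have hlt : pvMu tf (trace ++ [t]) < pvMu tf trace := pvMu_lt htS ht
        rw [IH (pvMu tf (trace ++ [t])) (lt_of_lt_of_le hlt hμ) tf (pvItems tf t)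
            (trace ++ [t]) (sym ++ [a]) (pvFrames tf trace sym rest ++ st)
            (PySem.Set.add acc (sym ++ [a])) le_rfl (pvItems_targets tf t)]
        rw [ihr trace sym st _ hμ hmemr]
        rw [pvGoA]
        simp [ht, htS]
      · push_neg at ht
        have hfr : pvFrames tf trace sym ((a, t) :: rest) = pvFrames tf trace sym rest := by
          simp [pvFrames, ht]
        rw [hfr, ihr trace sym st _ hμ hmemr, pvGoA]
        simp [ht]

-- ===== VERDICT (by name: the statement is the Claim_ definition above) =====
theorem characteristic_set_spec : Claim_equal_characteristic_set := by
  intro tf _ _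
  unfold Spec_characteristic_set characteristic_set characteristic_set_alt
  rw [pvLoopB_eq_pvGoB tf _ _ _ (pvFuelB_big tf)]
  rw [pvGoB_cons]
  rw [show pvFrames tf [0] [] (pvItems tf 0) ++ ([] : List (Int × List Int × List String)) =
      pvFrames tf [0] [] (pvItems tf 0) ++ [] from rfl]
  rw [pvKey (pvMu tf [0]) tf (pvItems tf 0) [0] [] [] _ le_rfl (pvItems_targets tf 0)]
  rw [pvGoB_nil]
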